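-- pv_equiv track=rewrite | github.com/yang-su2000/CP-Practice | 2022-10/825b.py | foo
-- ===== SOURCE A (Python) =====
-- import math
--
-- def lcm(a, b):
--     return abs(a * b) // math.gcd(a, b)
--
-- def foo(n, a):
--     b = [1] * (n + 1)
--     for i in range(n):
--         b[i] = lcm(b[i], a[i])
--         b[i+1] = a[i]
--     for i in range(n):
--         if a[i] != math.gcd(b[i], b[i+1]):
--             return False
--     return True
-- ===== SOURCE B (Python) =====
-- import math
--
-- def foo(n, a):
--     # By the gcd/lcm distributive-lattice identity gcd(lcm(x,y), lcm(y,z)) = lcm(y, gcd(x,z)),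
--     # A's check reduces to: every a[i] (i < n) is nonnegative, and for each interior index
--     # gcd(a[i-1], a[i+1]) divides a[i].  No lcm is ever computed.
--     if any(a[i] < 0 for i in range(n)):
--         return False
--     for i in range(1, n - 1):
--         g = math.gcd(a[i - 1], a[i + 1])
--         if math.gcd(g, a[i]) != g:
--             return False
--     return True
-- ===== Notes on version B (the rewrite author's own statement) =====
-- stated objective: simpler
-- what changed: B uses the distributive-lattice identity gcd(lcm(x,y),lcm(y,z)) = lcm(y,gcd(x,z)) to replace A's lcm-table build-then-scan by two direct checks: every a[i] is nonnegative and gcd(a[i-1],a[i+1]) divides each interior a[i]; B computes no lcm and keeps no table.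
import Mathlib
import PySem

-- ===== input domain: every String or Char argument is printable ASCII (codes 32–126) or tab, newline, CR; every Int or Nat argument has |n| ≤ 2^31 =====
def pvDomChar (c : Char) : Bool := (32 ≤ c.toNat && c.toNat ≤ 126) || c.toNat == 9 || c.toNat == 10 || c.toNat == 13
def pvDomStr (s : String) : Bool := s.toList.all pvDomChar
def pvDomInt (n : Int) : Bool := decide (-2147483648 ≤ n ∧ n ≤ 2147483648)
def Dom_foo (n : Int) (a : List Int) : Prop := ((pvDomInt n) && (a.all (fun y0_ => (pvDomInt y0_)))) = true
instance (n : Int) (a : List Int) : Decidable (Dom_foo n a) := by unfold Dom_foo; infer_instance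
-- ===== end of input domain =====

-- B replaces A's lcm-table build-then-scan by the lattice identity gcd(lcm(x,y),lcm(y,z)) = lcm(y,gcd(x,z)):
-- it only checks nonnegativity and that gcd(a[i-1],a[i+1]) divides a[i], computing no lcm at all (objective: simpler).

-- ===== PORT A =====
-- Python helper lcm(a, b) = abs(a*b) // math.gcd(a, b)
def pyLcm (x y : Int) : Int := PySem.Int.floordiv |x * y| ((Int.gcd x y : Nat) : Int)

-- body of A's first loop: b[i] = lcm(b[i], a[i]); b[i+1] = a[i]
def fooStep (a : List Int) (b : List Int) (i : Int) : List Int :=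
  let b1 := b.set i.toNat (pyLcm (PySem.List.pyGetD b i 1) (PySem.List.pyGetD a i 1))
  b1.set (i + 1).toNat (PySem.List.pyGetD a i 1)

-- body of A's second loop: if a[i] != gcd(b[i], b[i+1]): return False
def fooCheck (a b : List Int) (ok : Bool) (i : Int) : Bool :=
  if PySem.List.pyGetD a i 1 ≠
      ((Int.gcd (PySem.List.pyGetD b i 1) (PySem.List.pyGetD b (i + 1) 1) : Nat) : Int)
    then false else ok

def foo (n : Int) (a : List Int) : Bool :=
  let b := (PySem.List.pyRange 0 n 1).foldl (fooStep a) (List.replicate (n + 1).toNat 1)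
  (PySem.List.pyRange 0 n 1).foldl (fooCheck a b) true

-- ===== PORT B =====
-- body of B's divisibility loop: g = gcd(a[i-1], a[i+1]); if gcd(g, a[i]) != g: return False
def altDivStep (a : List Int) (ok : Bool) (i : Int) : Bool :=
  if ((Int.gcd ((Int.gcd (PySem.List.pyGetD a (i - 1) 1) (PySem.List.pyGetD a (i + 1) 1) : Nat) : Int)
        (PySem.List.pyGetD a i 1) : Nat) : Int) ≠
      ((Int.gcd (PySem.List.pyGetD a (i - 1) 1) (PySem.List.pyGetD a (i + 1) 1) : Nat) : Int)
    then false else ok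

def foo_alt (n : Int) (a : List Int) : Bool :=
  if (PySem.List.pyRange 0 n 1).any (fun i => decide (PySem.List.pyGetD a i 1 < 0)) then false
  else (PySem.List.pyRange 1 (n - 1) 1).foldl (altDivStep a) true

-- ===== PRECONDITION & SPEC =====
-- Pre_ excludes exactly the inputs where Python A raises: n > len(a) (IndexError) and two
-- adjacent zeros among the first n elements (ZeroDivisionError in lcm).
def Pre_foo (n : Int) (a : List Int) : Prop :=
  n ≤ (a.length : Int) ∧
  ∀ i : Nat, i < n.toNat → i + 1 < n.toNat → ¬(a.getD i 0 = 0 ∧ a.getD (i + 1) 0 = 0)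
instance (n : Int) (a : List Int) : Decidable (Pre_foo n a) := by unfold Pre_foo; infer_instance

def pvWitness_foo : Int × List Int := (2, [2, 4])

def Spec_foo (n : Int) (a : List Int) (out : Bool) : Prop := out = foo_alt n a
instance (n : Int) (a : List Int) (out : Bool) : Decidable (Spec_foo n a out) := by unfold Spec_foo; infer_instance

-- ===== CLAIM (what is proved, stated in full; the proofs are below) =====
def Claim_equal_foo : Prop := ∀ (n : Int) (a : List Int), Dom_foo n a → Pre_foo n a → Spec_foo n a (foo n a)

-- ===== LEMMAS AND PROOFS =====

-- value of A's table b after the first loop, at index j, once k iterations ran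
def expectedB (a : List Int) (k j : Nat) : Int :=
  if j = 0 then (if k = 0 then 1 else pyLcm 1 (PySem.List.pyGetD a 0 1))
  else if j < k then pyLcm (PySem.List.pyGetD a ((j - 1 : Nat) : Int) 1) (PySem.List.pyGetD a (j : Nat) 1)
  else if j = k then PySem.List.pyGetD a (((k - 1 : Nat) : Nat) : Int) 1
  else 1

lemma pyLcm_one_left (x : Int) : pyLcm 1 x = |x| := by
  unfold pyLcm
  rw [Int.one_gcd, one_mul, Nat.cast_one, PySem.Int.floordiv_eq_ediv_of_pos (by norm_num)]
  exact Int.ediv_one _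

-- pyLcm computes the Nat lcm of the absolute values (PySem.Int.floordiv _ 0 = 0 covers x = y = 0)
lemma pyLcm_abs (x y : Int) : pyLcm x y = ((Nat.lcm x.natAbs y.natAbs : Nat) : Int) := by
  unfold pyLcm
  have habs : |x * y| = ((x.natAbs * y.natAbs : Nat) : Int) := by
    rw [Int.abs_eq_natAbs, Int.natAbs_mul]
  rw [habs, show ((Int.gcd x y : Nat) : Int) = ((Nat.gcd x.natAbs y.natAbs : Nat) : Int) from rfl,
    PySem.Int.floordiv_natCast]
  rfl

-- the distributive-lattice identity on ℕ under divisibility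
lemma natkey (x y z : ℕ) :
    Nat.gcd (Nat.lcm x y) (Nat.lcm y z) = Nat.lcm y (Nat.gcd x z) := by
  rcases eq_or_ne y 0 with rfl | hy
  · simp
  rcases eq_or_ne x 0 with rfl | hx
  · simp
  rcases eq_or_ne z 0 with rfl | hz
  · simp [Nat.lcm_comm]
  have hxy : Nat.lcm x y ≠ 0 := Nat.lcm_ne_zero hx hy
  have hyz : Nat.lcm y z ≠ 0 := Nat.lcm_ne_zero hy hz
  have hxz : Nat.gcd x z ≠ 0 := fun h => hx (Nat.eq_zero_of_gcd_eq_zero_left h)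
  have hL : Nat.gcd (Nat.lcm x y) (Nat.lcm y z) ≠ 0 :=
    fun h => hxy (Nat.eq_zero_of_gcd_eq_zero_left h)
  have hR : Nat.lcm y (Nat.gcd x z) ≠ 0 := Nat.lcm_ne_zero hy hxz
  apply Nat.eq_of_factorization_eq hL hR
  intro p
  rw [Nat.factorization_gcd hxy hyz, Nat.factorization_lcm hy hxz,
    Nat.factorization_lcm hx hy, Nat.factorization_lcm hy hz, Nat.factorization_gcd hx hz,
    Finsupp.inf_apply, Finsupp.sup_apply, Finsupp.sup_apply, Finsupp.sup_apply, Finsupp.inf_apply]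
  have hmin : ∀ u v : ℕ, u ⊓ v = min u v := fun _ _ => rfl
  have hmax : ∀ u v : ℕ, u ⊔ v = max u v := fun _ _ => rfl
  rw [hmin, hmax, hmax, hmax, hmin]
  omega

lemma eq_natAbs_iff (y : Int) : y = ((y.natAbs : Nat) : Int) ↔ 0 ≤ y := by
  constructor
  · intro h; rw [h]; exact Int.natCast_nonneg _
  · intro h; exact (Int.natAbs_of_nonneg h).symm

lemma natAbs_cast (m : Nat) : ((m : Int)).natAbs = m := Int.natAbs_natCast m

lemma fooStep_length (a b : List Int) (i : Int) : (fooStep a b i).length = b.length := by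
  simp [fooStep]

lemma foldl_fooStep_length (a : List Int) (l : List Int) (b : List Int) :
    (l.foldl (fooStep a) b).length = b.length := by
  induction l generalizing b with
  | nil => rfl
  | cons x xs ih => simpa [List.foldl, fooStep_length] using ih (fooStep a b x)

lemma bchar (n : Int) (a : List Int) (hn : 0 ≤ n) (k : Nat) (hk : (k : Int) ≤ n) :
    ∀ j : Nat,
      PySem.List.pyGetD ((PySem.List.pyRange 0 (k : Int) 1).foldl (fooStep a)
          (List.replicate (n + 1).toNat 1)) (j : Int) 1 = expectedB a k j := by
  induction k with
  | zero =>
    intro j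
    rw [PySem.List.pyRange_one_eq_nil (by omega), List.foldl_nil,
      PySem.List.pyGetD_natCast, List.getD_eq_getElem?_getD, List.getElem?_replicate]
    unfold expectedB
    split_ifs <;> simp <;> omega
  | succ k ih =>
    intro j
    have hk' : (k : Int) ≤ n := by push_cast at hk ⊢; omega
    have hkK : k < (n + 1).toNat := by omega
    have hkK1 : k + 1 < (n + 1).toNat := by omega
    have hB := ih hk'
    have hlen : ((PySem.List.pyRange 0 (k : Int) 1).foldl (fooStep a)
        (List.replicate (n + 1).toNat 1)).length = (n + 1).toNat := by
      rw [foldl_fooStep_length, List.length_replicate]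
    set B := (PySem.List.pyRange 0 (k : Int) 1).foldl (fooStep a)
        (List.replicate (n + 1).toNat 1) with hBdef
    rw [show (((k + 1 : Nat) : Int)) = ((k : Nat) + 1 : Int) by push_cast; ring,
      PySem.List.pyRange_one_succ_right (by omega),
      List.foldl_append, List.foldl_cons, List.foldl_nil]
    show PySem.List.pyGetD (fooStep a B (k : Int)) (j : Int) 1 = expectedB a (k + 1) j
    unfold fooStep
    simp only [show ((k : Int)).toNat = k from by omega,
      show ((k : Int) + 1).toNat = k + 1 from by omega]
    rw [PySem.List.pyGetD_natCast, hB k, List.getD_eq_getElem?_getD]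
    rcases Nat.lt_trichotomy j (k + 1) with hj | hj | hj
    · rcases Nat.lt_or_ge j k with hjk | hjk
      · -- untouched index j < k
        rw [List.getElem?_set_ne (by omega), List.getElem?_set_ne (by omega),
          ← List.getD_eq_getElem?_getD, ← PySem.List.pyGetD_natCast, hB j]
        unfold expectedB
        split_ifs <;> first | rfl | omega | contradiction
      · -- j = k : the lcm cell
        have hjk' : j = k := by omega
        subst hjk'
        rw [List.getElem?_set_ne (by omega),
          List.getElem?_set_self (by omega), Option.getD_some]
        by_cases hk0 : j = 0
        · simp [expectedB, hk0, PySem.List.pyGetD]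
        · unfold expectedB
          split_ifs <;> first | rfl | omega
    · -- j = k + 1 : set to a[k]
      subst hj
      rw [List.getElem?_set_self (by simp [List.length_set]; omega), Option.getD_some]
      unfold expectedB
      split_ifs <;> first | rfl | omega | contradiction
    · -- j > k + 1 : untouched, still 1
      rw [List.getElem?_set_ne (by omega), List.getElem?_set_ne (by omega),
        ← List.getD_eq_getElem?_getD, ← PySem.List.pyGetD_natCast, hB j]
      unfold expectedB
      split_ifs <;> first | rfl | omega

-- unfolding A's second loop into List.all
lemma foldl_fooCheck (a b : List Int) (l : List Int) (s : Bool) :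
    l.foldl (fooCheck a b) s = (s && l.all fun i =>
      decide (PySem.List.pyGetD a i 1 =
        ((Int.gcd (PySem.List.pyGetD b i 1) (PySem.List.pyGetD b (i + 1) 1) : Nat) : Int))) := by
  induction l generalizing s with
  | nil => simp
  | cons x xs ih =>
    rw [List.foldl_cons, ih, List.all_cons]
    unfold fooCheck
    split_ifs with h
    · simp [h]
    · rw [not_ne_iff] at h
      simp only [h, decide_true]
      cases s <;> simp

-- unfolding B's divisibility loop into List.all
lemma foldl_altDiv (a : List Int) (l : List Int) (s : Bool) :
    l.foldl (altDivStep a) s = (s && l.all fun i =>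
      decide (((Int.gcd ((Int.gcd (PySem.List.pyGetD a (i - 1) 1) (PySem.List.pyGetD a (i + 1) 1) : Nat) : Int)
          (PySem.List.pyGetD a i 1) : Nat) : Int) =
        ((Int.gcd (PySem.List.pyGetD a (i - 1) 1) (PySem.List.pyGetD a (i + 1) 1) : Nat) : Int))) := by
  induction l generalizing s with
  | nil => simp
  | cons x xs ih =>
    rw [List.foldl_cons, ih, List.all_cons]
    unfold altDivStep
    split_ifs with h
    · simp [h]
    · rw [not_ne_iff] at h
      simp only [h, decide_true]
      cases s <;> simp

-- B's per-index test says gcd(a[j-1], a[j+1]) divides a[j]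
lemma bcond_iff (x y z : Int) :
    (((Int.gcd ((Int.gcd x z : Nat) : Int) y : Nat) : Int) = ((Int.gcd x z : Nat) : Int)) ↔
      Nat.gcd x.natAbs z.natAbs ∣ y.natAbs := by
  have h1 : (Int.gcd ((Int.gcd x z : Nat) : Int) y : Nat) = Nat.gcd (Nat.gcd x.natAbs z.natAbs) y.natAbs := by
    unfold Int.gcd
    rw [natAbs_cast]
  rw [h1, show (Int.gcd x z : Nat) = Nat.gcd x.natAbs z.natAbs from rfl, Nat.cast_inj]
  constructor
  · intro h; rw [← h]; exact Nat.gcd_dvd_right _ _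
  · exact Nat.gcd_eq_left

-- A's per-index condition, with b's cells written out, characterised
lemma acond_char (a : List Int) (K j : Nat) (hj : j < K) :
    (PySem.List.pyGetD a (j : Int) 1 =
        ((Int.gcd (expectedB a K j) (expectedB a K (j + 1)) : Nat) : Int)) ↔
      (0 ≤ PySem.List.pyGetD a (j : Int) 1 ∧
        (1 ≤ j → j + 1 < K →
          Nat.gcd (PySem.List.pyGetD a ((j : Int) - 1) 1).natAbs
              (PySem.List.pyGetD a ((j : Int) + 1) 1).natAbs ∣
            (PySem.List.pyGetD a (j : Int) 1).natAbs)) := by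
  have hz' : PySem.List.pyGetD a ((j : Int) + 1) 1 = PySem.List.pyGetD a (((j + 1 : Nat)) : Int) 1 := by
    congr 1
  by_cases hj0 : j = 0
  · subst hj0
    have hb0 : expectedB a K 0 = (((PySem.List.pyGetD a ((0 : Nat) : Int) 1).natAbs : Nat) : Int) := by
      unfold expectedB
      rw [if_pos rfl, if_neg (by omega), pyLcm_one_left, Int.abs_eq_natAbs]
      try norm_num
    by_cases hK1 : K = 1
    · subst hK1
      have hb1 : expectedB a 1 1 = PySem.List.pyGetD a ((0 : Nat) : Int) 1 := by
        unfold expectedB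
        try norm_num
      rw [hb0, hb1]
      have hg : (Int.gcd (((PySem.List.pyGetD a ((0 : Nat) : Int) 1).natAbs : Nat) : Int)
          (PySem.List.pyGetD a ((0 : Nat) : Int) 1) : Nat) = (PySem.List.pyGetD a ((0 : Nat) : Int) 1).natAbs := by
        unfold Int.gcd
        rw [natAbs_cast, Nat.gcd_self]
      rw [hg, eq_natAbs_iff]
      exact ⟨fun h => ⟨h, by omega⟩, fun h => h.1⟩
    · have hb1 : expectedB a K 1 =
          pyLcm (PySem.List.pyGetD a ((0 : Nat) : Int) 1) (PySem.List.pyGetD a ((1 : Nat) : Int) 1) := by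
        unfold expectedB
        rw [if_neg (by omega), if_pos (by omega)]
        try norm_num
      rw [hb0, hb1, pyLcm_abs]
      have hg : (Int.gcd (((PySem.List.pyGetD a ((0 : Nat) : Int) 1).natAbs : Nat) : Int)
          ((Nat.lcm (PySem.List.pyGetD a ((0 : Nat) : Int) 1).natAbs
            (PySem.List.pyGetD a ((1 : Nat) : Int) 1).natAbs : Nat) : Int) : Nat) =
          (PySem.List.pyGetD a ((0 : Nat) : Int) 1).natAbs := by
        unfold Int.gcd
        rw [natAbs_cast, natAbs_cast]
        exact Nat.gcd_eq_left (Nat.dvd_lcm_left _ _)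
      rw [hg, eq_natAbs_iff]
      exact ⟨fun h => ⟨h, by omega⟩, fun h => h.1⟩
  · -- 1 ≤ j < K
    have hj1 : 1 ≤ j := by omega
    have hx' : PySem.List.pyGetD a ((j : Int) - 1) 1 = PySem.List.pyGetD a (((j - 1 : Nat)) : Int) 1 := by
      congr 1
      omega
    have hbj : expectedB a K j =
        pyLcm (PySem.List.pyGetD a (((j - 1 : Nat)) : Int) 1) (PySem.List.pyGetD a (j : Int) 1) := by
      unfold expectedB
      rw [if_neg hj0, if_pos hj]
    by_cases hjK : j + 1 = K
    · -- last index
      have hbj1 : expectedB a K (j + 1) = PySem.List.pyGetD a (j : Int) 1 := by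
        unfold expectedB
        rw [if_neg (by omega), if_neg (by omega), if_pos hjK,
          show K - 1 = j from by omega]
      rw [hbj, hbj1, pyLcm_abs]
      have hg : (Int.gcd ((Nat.lcm (PySem.List.pyGetD a (((j - 1 : Nat)) : Int) 1).natAbs
            (PySem.List.pyGetD a (j : Int) 1).natAbs : Nat) : Int)
          (PySem.List.pyGetD a (j : Int) 1) : Nat) = (PySem.List.pyGetD a (j : Int) 1).natAbs := by
        unfold Int.gcd
        rw [natAbs_cast]
        exact Nat.gcd_eq_right (Nat.dvd_lcm_right _ _)
      rw [hg, eq_natAbs_iff]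
      exact ⟨fun h => ⟨h, by omega⟩, fun h => h.1⟩
    · -- interior index
      have hbj1 : expectedB a K (j + 1) =
          pyLcm (PySem.List.pyGetD a (j : Int) 1) (PySem.List.pyGetD a (((j + 1 : Nat)) : Int) 1) := by
        unfold expectedB
        rw [if_neg (by omega), if_pos (by omega)]
        simp only [Nat.add_sub_cancel]
      have hG : (Int.gcd (expectedB a K j) (expectedB a K (j + 1)) : Nat) =
          Nat.lcm (PySem.List.pyGetD a (j : Int) 1).natAbs
            (Nat.gcd (PySem.List.pyGetD a (((j - 1 : Nat)) : Int) 1).natAbs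
              (PySem.List.pyGetD a (((j + 1 : Nat)) : Int) 1).natAbs) := by
        rw [hbj, hbj1, pyLcm_abs, pyLcm_abs]
        unfold Int.gcd
        rw [natAbs_cast, natAbs_cast]
        rw [natkey, Nat.lcm_comm]
      rw [hG, hx', hz']
      set y := PySem.List.pyGetD a (j : Int) 1
      set G := Nat.gcd (PySem.List.pyGetD a (((j - 1 : Nat)) : Int) 1).natAbs
        (PySem.List.pyGetD a (((j + 1 : Nat)) : Int) 1).natAbs
      constructor
      · intro h
        have h0 : 0 ≤ y := by rw [h]; exact Int.natCast_nonneg _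
        refine ⟨h0, fun _ _ => ?_⟩
        have hYA : y.natAbs = Nat.lcm y.natAbs G := by
          have := congrArg Int.natAbs h
          rwa [natAbs_cast] at this
        exact hYA ▸ Nat.dvd_lcm_right _ _
      · rintro ⟨h0, hdvd⟩
        have hd := hdvd hj1 (by omega)
        have hlcm : Nat.lcm y.natAbs G = y.natAbs :=
          Nat.dvd_antisymm (Nat.lcm_dvd (dvd_refl _) hd) (Nat.dvd_lcm_left _ _)
        rw [hlcm, ← eq_natAbs_iff] at *
        exact h0

-- assembling the pointwise characterisation over the whole range
lemma key_iff (a : List Int) (K : Nat) :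
    (∀ j : Nat, j < K →
        PySem.List.pyGetD a (j : Int) 1 =
          ((Int.gcd (expectedB a K j) (expectedB a K (j + 1)) : Nat) : Int)) ↔
      ((∀ j : Nat, j < K → 0 ≤ PySem.List.pyGetD a (j : Int) 1) ∧
        (∀ j : Nat, 1 ≤ j → j + 1 < K →
          ((Int.gcd ((Int.gcd (PySem.List.pyGetD a ((j : Int) - 1) 1)
                (PySem.List.pyGetD a ((j : Int) + 1) 1) : Nat) : Int)
              (PySem.List.pyGetD a (j : Int) 1) : Nat) : Int) =
            ((Int.gcd (PySem.List.pyGetD a ((j : Int) - 1) 1)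
                (PySem.List.pyGetD a ((j : Int) + 1) 1) : Nat) : Int))) := by
  constructor
  · intro h
    constructor
    · intro j hj
      exact ((acond_char a K j hj).1 (h j hj)).1
    · intro j hj1 hjK
      rw [bcond_iff]
      exact ((acond_char a K j (by omega)).1 (h j (by omega))).2 hj1 hjK
  · rintro ⟨h0, hd⟩ j hj
    refine (acond_char a K j hj).2 ⟨h0 j hj, fun hj1 hjK => ?_⟩
    rw [← bcond_iff]
    exact hd j hj1 hjK

-- ===== VERDICT (by name: the statement is the Claim_ definition above) =====
theorem foo_spec : Claim_equal_foo := by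
  intro n a _ _
  unfold Spec_foo foo foo_alt
  by_cases hn : 0 < n
  · set K := n.toNat with hK
    have hnK : n = (K : Int) := by omega
    have hb := bchar n a (by omega) K (by omega)
    rw [hnK] at hb
    rw [Bool.eq_iff_iff, foldl_fooCheck]
    have hA : ∀ i ∈ PySem.List.pyRange 0 n 1,
        (PySem.List.pyGetD ((PySem.List.pyRange 0 n 1).foldl (fooStep a)
            (List.replicate (n + 1).toNat 1)) i 1) = expectedB a K i.toNat ∧
        (PySem.List.pyGetD ((PySem.List.pyRange 0 n 1).foldl (fooStep a)
            (List.replicate (n + 1).toNat 1)) (i + 1) 1) = expectedB a K (i.toNat + 1) := by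
      intro i hi
      obtain ⟨hi0, hi1⟩ := (PySem.List.mem_pyRange_one).1 hi
      obtain ⟨j, rfl⟩ : ∃ j : Nat, i = ((j : Nat) : Int) := ⟨i.toNat, by omega⟩
      rw [hnK, Int.toNat_natCast]
      constructor
      · exact hb j
      · rw [show ((j : Nat) : Int) + 1 = ((j + 1 : Nat) : Int) from by omega]
        exact hb (j + 1)
    constructor
    · -- foo = true → foo_alt = true
      intro hfoo
      simp only [Bool.true_and, List.all_eq_true, decide_eq_true_eq] at hfoo
      have hcond : ∀ j : Nat, j < K →
          PySem.List.pyGetD a (j : Int) 1 =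
            ((Int.gcd (expectedB a K j) (expectedB a K (j + 1)) : Nat) : Int) := by
        intro j hj
        have hmem : ((j : Int)) ∈ PySem.List.pyRange 0 n 1 :=
          (PySem.List.mem_pyRange_one).2 ⟨by omega, by omega⟩
        have := hfoo _ hmem
        obtain ⟨e1, e2⟩ := hA _ hmem
        rw [e1, e2] at this
        simpa using this
      obtain ⟨h0, hd⟩ := (key_iff a K).1 hcond
      rw [if_neg, foldl_altDiv]
      · simp only [Bool.true_and, List.all_eq_true, decide_eq_true_eq]
        intro i hi
        obtain ⟨hi1, hi2⟩ := (PySem.List.mem_pyRange_one).1 hi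
        have := hd i.toNat (by omega) (by omega)
        rw [show ((i.toNat : Nat) : Int) = i from by omega] at this
        exact this
      · simp only [List.any_eq_true, decide_eq_true_eq, not_exists, not_and]
        intro i hi
        obtain ⟨hi1, hi2⟩ := (PySem.List.mem_pyRange_one).1 hi
        have := h0 i.toNat (by omega)
        rw [show ((i.toNat : Nat) : Int) = i from by omega] at this
        omega
    · -- foo_alt = true → foo = true
      intro halt
      split_ifs at halt with hneg
      rw [foldl_altDiv] at halt
      simp only [Bool.true_and, List.all_eq_true, decide_eq_true_eq] at halt
      simp only [List.any_eq_true, decide_eq_true_eq, not_exists, not_and] at hneg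
      have hcond := (key_iff a K).2 ⟨?_, ?_⟩
      · simp only [Bool.true_and, List.all_eq_true, decide_eq_true_eq]
        intro i hi
        obtain ⟨e1, e2⟩ := hA i hi
        rw [e1, e2]
        obtain ⟨hi1, hi2⟩ := (PySem.List.mem_pyRange_one).1 hi
        have := hcond i.toNat (by omega)
        rw [show ((i.toNat : Nat) : Int) = i from by omega] at this
        exact this
      · intro j hj
        have hmem : ((j : Int)) ∈ PySem.List.pyRange 0 n 1 :=
          (PySem.List.mem_pyRange_one).2 ⟨by omega, by omega⟩
        have := hneg _ hmem
        omega
      · intro j hj1 hjK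
        have hmem : ((j : Int)) ∈ PySem.List.pyRange 1 (n - 1) 1 :=
          (PySem.List.mem_pyRange_one).2 ⟨by omega, by omega⟩
        exact halt _ hmem
  · -- n ≤ 0 : both loops are empty and both sides are true
    rw [PySem.List.pyRange_one_eq_nil (by omega : n ≤ 0),
      PySem.List.pyRange_one_eq_nil (by omega : n - 1 ≤ 1)]
    simp
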